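-- pv_equiv track=rewrite | github.com/andrian531/srt-extractor-translator | translate_srt.py | wrap_translated_line
-- ===== SOURCE A (Python) =====
-- def wrap_translated_line(text, max_chars=42):
--     """Wrap translated text to max_chars per line, max 2 lines.
--     Finds the best split point near the midpoint of the text.
--     """
--     if len(text) <= max_chars:
--         return text
--     # If already has newline, check if it's OK
--     if '\n' in text:
--         lines = [l.strip() for l in text.split('\n') if l.strip()]
--         if all(len(l) <= max_chars for l in lines[:2]):
--             return '\n'.join(lines[:2])
--
--     # Find best split point near midpoint
--     mid = len(text) // 2
--     best_split = -1
--     # Search outward from midpoint for a space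
--     for radius in range(mid):
--         left = mid - radius
--         right = mid + radius
--         if left > 0 and text[left] == ' ':
--             best_split = left
--             break
--         if right < len(text) - 1 and text[right] == ' ':
--             best_split = right
--             break
--
--     if best_split > 0:
--         line1 = text[:best_split].strip()
--         line2 = text[best_split:].strip()
--         return line1 + '\n' + line2
--     return text
-- ===== SOURCE B (Python) =====
-- def wrap_translated_line(text, max_chars=42):
--     """Wrap translated text to max_chars per line, max 2 lines (two directional
--     scans from the midpoint instead of an interleaved outward radius search)."""
--     if len(text) <= max_chars:
--         return text
--     if '\n' in text:
--         lines = [l.strip() for l in text.split('\n') if l.strip()]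
--         if all(len(l) <= max_chars for l in lines[:2]):
--             return '\n'.join(lines[:2])
--     n = len(text)
--     mid = n // 2
--     # nearest space at or left of mid (index must stay > 0)
--     i = mid
--     while i > 0 and text[i] != ' ':
--         i -= 1
--     # nearest space right of mid (index must stay < n - 1)
--     j = mid + 1
--     while j < n - 1 and text[j] != ' ':
--         j += 1
--     has_l = i > 0
--     has_r = j < n - 1
--     if not has_l and not has_r:
--         return text
--     split = i if has_l and (not has_r or mid - i <= j - mid) else j
--     return text[:split].strip() + '\n' + text[split:].strip()
-- ===== Notes on version B (the rewrite author's own statement) =====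
-- stated objective: alternative
-- what changed: The outward radius loop that interleaves left/right probes around the midpoint is replaced by two independent directional scans (one walking left from mid, one walking right), whose results are then compared by distance with the left winning ties.
import Mathlib
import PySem

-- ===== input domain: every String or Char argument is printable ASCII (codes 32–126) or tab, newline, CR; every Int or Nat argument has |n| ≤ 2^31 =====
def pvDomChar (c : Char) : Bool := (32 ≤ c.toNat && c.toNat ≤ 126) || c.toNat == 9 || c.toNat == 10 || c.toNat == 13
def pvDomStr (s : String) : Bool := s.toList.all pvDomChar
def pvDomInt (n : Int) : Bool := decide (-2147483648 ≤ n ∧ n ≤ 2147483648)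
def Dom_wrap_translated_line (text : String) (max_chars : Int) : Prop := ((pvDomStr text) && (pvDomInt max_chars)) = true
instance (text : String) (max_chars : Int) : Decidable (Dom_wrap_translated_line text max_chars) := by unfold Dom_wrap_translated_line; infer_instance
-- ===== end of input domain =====

-- B replaces A's interleaved outward radius search with two independent directional scans
-- from the midpoint (objective: alternative decomposition; same behaviour, proved below).


-- ===== PORT A =====
-- A's 'for radius in range(mid)' loop with its two breaks; fuel = number of remaining
-- radii (called with fuel = mid - radius, exactly range(mid)); -1 = no break taken.
-- All indexed accesses are guarded in range by the conditions, so List.getD is exact here.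
def pvALoop (cs : List Char) (mid radius fuel : Nat) : Int :=
  match fuel with
  | 0 => -1
  | f + 1 =>
    if 0 < mid - radius ∧ cs.getD (mid - radius) '\x00' = ' ' then ((mid - radius : Nat) : Int)
    else if mid + radius < cs.length - 1 ∧ cs.getD (mid + radius) '\x00' = ' ' then ((mid + radius : Nat) : Int)
    else pvALoop cs mid (radius + 1) f

def wrap_translated_line (text : String) (max_chars : Int) : String :=
  let cs := text.toList
  if (cs.length : Int) ≤ max_chars then text
  else
    let lines := ((PySem.Chars.splitOn cs ['\n']).filter (fun l => PySem.Chars.strip l ≠ [])).map (fun l => PySem.Chars.strip l)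
    if PySem.Chars.isIn ['\n'] cs ∧ (lines.take 2).all (fun l => decide ((l.length : Int) ≤ max_chars)) then
      String.ofList (PySem.Chars.join ['\n'] (lines.take 2))
    else
      let mid := cs.length / 2
      let best := pvALoop cs mid 0 mid
      if 0 < best then
        String.ofList (PySem.Chars.strip (PySem.List.slice cs none (some best)) ++ ['\n'] ++ PySem.Chars.strip (PySem.List.slice cs (some best) none))
      else text

-- ===== PORT B =====
-- B's 'while i > 0 and text[i] != ' '' downward scan (structural on i).
def pvLeftScan (cs : List Char) (i : Nat) : Nat :=
  match i with
  | 0 => 0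
  | i' + 1 => if cs.getD (i' + 1) '\x00' ≠ ' ' then pvLeftScan cs i' else i' + 1

-- B's 'while j < n - 1 and text[j] != ' '' upward scan.
def pvRightScan (cs : List Char) (j stop : Nat) : Nat :=
  if h : j < stop then
    if cs.getD j '\x00' ≠ ' ' then pvRightScan cs (j + 1) stop else j
  else j
termination_by stop - j
decreasing_by omega

def wrap_translated_line_alt (text : String) (max_chars : Int) : String :=
  let cs := text.toList
  if (cs.length : Int) ≤ max_chars then text
  else
    let lines := ((PySem.Chars.splitOn cs ['\n']).filter (fun l => PySem.Chars.strip l ≠ [])).map (fun l => PySem.Chars.strip l)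
    if PySem.Chars.isIn ['\n'] cs ∧ (lines.take 2).all (fun l => decide ((l.length : Int) ≤ max_chars)) then
      String.ofList (PySem.Chars.join ['\n'] (lines.take 2))
    else
      let n := cs.length
      let mid := n / 2
      let i := pvLeftScan cs mid
      let j := pvRightScan cs (mid + 1) (n - 1)
      if ¬ 0 < i ∧ ¬ j < n - 1 then text
      else
        let split : Int := if 0 < i ∧ (¬ j < n - 1 ∨ (mid : Int) - i ≤ (j : Int) - mid) then (i : Int) else (j : Int)
        String.ofList (PySem.Chars.strip (PySem.List.slice cs none (some split)) ++ ['\n'] ++ PySem.Chars.strip (PySem.List.slice cs (some split) none))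

-- ===== PRECONDITION & SPEC =====
def Spec_wrap_translated_line (text : String) (max_chars : Int) (out : String) : Prop := out = wrap_translated_line_alt text max_chars
instance (text : String) (max_chars : Int) (out : String) : Decidable (Spec_wrap_translated_line text max_chars out) := by unfold Spec_wrap_translated_line; infer_instance

-- ===== CLAIM (what is proved, stated in full; the proofs are below) =====
def Claim_equal_wrap_translated_line : Prop := ∀ (text : String) (max_chars : Int), Dom_wrap_translated_line text max_chars → Spec_wrap_translated_line text max_chars (wrap_translated_line text max_chars)

-- ===== LEMMAS AND PROOFS =====

lemma pvLeftScan_le (cs : List Char) (k : Nat) : pvLeftScan cs k ≤ k := by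
  induction k with
  | zero => simp [pvLeftScan]
  | succ i ih => unfold pvLeftScan; split <;> omega

lemma pvRightScan_ge (cs : List Char) (j stop : Nat) : j ≤ pvRightScan cs j stop := by
  unfold pvRightScan
  split
  · split
    · have := pvRightScan_ge cs (j + 1) stop
      omega
    · omega
  · omega
termination_by stop - j
decreasing_by omega

lemma pvRightScan_of_ge (cs : List Char) (j stop : Nat) (h : ¬ j < stop) : pvRightScan cs j stop = j := by
  unfold pvRightScan; simp [h]

lemma pvLeftScan_hit (cs : List Char) (k : Nat) (hk : 0 < k) (h : cs.getD k '\x00' = ' ') :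
    pvLeftScan cs k = k := by
  cases k with
  | zero => omega
  | succ i => simp only [pvLeftScan]; rw [if_neg (fun hh => hh h)]

lemma pvLeftScan_miss (cs : List Char) (k : Nat) (h : cs.getD k '\x00' ≠ ' ') :
    pvLeftScan cs k = pvLeftScan cs (k - 1) := by
  cases k with
  | zero => rfl
  | succ i => simp only [pvLeftScan]; rw [if_pos h]; rfl

lemma pvRightScan_hit (cs : List Char) (j stop : Nat) (h1 : j < stop) (h : cs.getD j '\x00' = ' ') :
    pvRightScan cs j stop = j := by
  rw [pvRightScan, dif_pos h1, if_neg (fun hh => hh h)]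

lemma pvRightScan_miss (cs : List Char) (j stop : Nat) (h1 : j < stop) (h : cs.getD j '\x00' ≠ ' ') :
    pvRightScan cs j stop = pvRightScan cs (j + 1) stop := by
  rw [pvRightScan, dif_pos h1, if_pos h]

lemma pvScan_inv (f : Nat) : ∀ (cs : List Char) (mid r : Nat), mid = cs.length / 2 → 1 ≤ r → r ≤ mid → mid - r = f →
    pvALoop cs mid r (mid - r) =
      (if 0 < pvLeftScan cs (mid - r) ∧ (¬ pvRightScan cs (mid + r) (cs.length - 1) < cs.length - 1 ∨ (mid : Int) - pvLeftScan cs (mid - r) ≤ (pvRightScan cs (mid + r) (cs.length - 1) : Int) - mid) then ((pvLeftScan cs (mid - r) : Nat) : Int)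
       else if pvRightScan cs (mid + r) (cs.length - 1) < cs.length - 1 then ((pvRightScan cs (mid + r) (cs.length - 1) : Nat) : Int)
       else -1) := by
  induction f with
  | zero =>
    intro cs mid r hm h1 hr hf
    have hge : ¬ mid + r < cs.length - 1 := by omega
    rw [hf, pvRightScan_of_ge cs _ _ hge]
    simp [pvALoop, pvLeftScan, hge]
  | succ f ih =>
    intro cs mid r hm h1 hr hf
    have hrlt : r < mid := by omega
    have hR := pvRightScan_ge cs (mid + r) (cs.length - 1)
    rw [hf]
    rw [pvALoop]
    rw [hf]
    by_cases hc : cs.getD (f + 1) '\x00' = ' '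
    · rw [if_pos ⟨by omega, hc⟩, pvLeftScan_hit cs (f + 1) (by omega) hc]
      rw [if_pos ⟨by omega, Or.inr (by omega)⟩]
    · rw [if_neg (by tauto), pvLeftScan_miss cs (f + 1) hc]
      simp only [Nat.add_sub_cancel]
      have hLle : pvLeftScan cs f ≤ f := pvLeftScan_le cs _
      by_cases hc2 : mid + r < cs.length - 1 ∧ cs.getD (mid + r) '\x00' = ' '
      · rw [if_pos hc2, pvRightScan_hit cs (mid + r) _ hc2.1 hc2.2]
        rw [if_neg, if_pos hc2.1]
        rintro ⟨hL0, hor⟩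
        rcases hor with h' | h'
        · exact h' hc2.1
        · push_cast at h'; omega
      · rw [if_neg hc2]
        have hstep := ih cs mid (r + 1) hm (by omega) (by omega) (by omega)
        rw [show mid - (r + 1) = f by omega] at hstep
        rw [hstep]
        by_cases hlt : mid + r < cs.length - 1
        · have hcs : cs.getD (mid + r) '\x00' ≠ ' ' := fun h => hc2 ⟨hlt, h⟩
          rw [show mid + (r + 1) = mid + r + 1 from rfl, ← pvRightScan_miss cs (mid + r) _ hlt hcs]
        · rw [pvRightScan_of_ge cs (mid + r) _ hlt,
              pvRightScan_of_ge cs (mid + (r + 1)) _ (by omega)]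
          have h2 : ¬ mid + (r + 1) < cs.length - 1 := by omega
          simp [hlt, h2]

lemma pvScan_main (cs : List Char) :
    pvALoop cs (cs.length / 2) 0 (cs.length / 2) =
      (if 0 < pvLeftScan cs (cs.length / 2) ∧ (¬ pvRightScan cs (cs.length / 2 + 1) (cs.length - 1) < cs.length - 1 ∨ ((cs.length / 2 : Nat) : Int) - pvLeftScan cs (cs.length / 2) ≤ (pvRightScan cs (cs.length / 2 + 1) (cs.length - 1) : Int) - (cs.length / 2 : Nat)) then ((pvLeftScan cs (cs.length / 2) : Nat) : Int)
       else if pvRightScan cs (cs.length / 2 + 1) (cs.length - 1) < cs.length - 1 then ((pvRightScan cs (cs.length / 2 + 1) (cs.length - 1) : Nat) : Int)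
       else -1) := by
  set n := cs.length with hn
  set mid := n / 2 with hm
  have hR := pvRightScan_ge cs (mid + 1) (n - 1)
  by_cases h0 : mid = 0
  · rw [h0] at hR ⊢
    rw [pvRightScan_of_ge cs _ _ (by omega : ¬ (0 + 1 : Nat) < n - 1)]
    have h1 : ¬ (0 + 1 : Nat) < n - 1 := by omega
    simp [pvALoop, pvLeftScan, h1]
  · have hmid1 : 1 ≤ mid := by omega
    conv_lhs => rw [show mid = (mid - 1) + 1 by omega]
    rw [pvALoop]
    rw [show mid - 1 + 1 = mid from by omega]
    simp only [Nat.sub_zero]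
    by_cases hc : cs.getD mid '\x00' = ' '
    · rw [if_pos ⟨hmid1, hc⟩, pvLeftScan_hit cs mid hmid1 hc]
      rw [if_pos ⟨hmid1, Or.inr (by omega)⟩]
    · rw [if_neg (by tauto), if_neg (by tauto)]
      have hstep := pvScan_inv (mid - 1) cs mid 1 hm (by omega) (by omega) (by omega)
      rw [← hn] at hstep
      simp only [Nat.zero_add]
      rw [hstep, ← pvLeftScan_miss cs mid hc]

lemma pvCore (cs : List Char) (t : String) :
    (if 0 < pvALoop cs (cs.length / 2) 0 (cs.length / 2) then
       String.ofList (PySem.Chars.strip (PySem.List.slice cs none (some (pvALoop cs (cs.length / 2) 0 (cs.length / 2)))) ++ ['\n'] ++ PySem.Chars.strip (PySem.List.slice cs (some (pvALoop cs (cs.length / 2) 0 (cs.length / 2))) none))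
     else t) =
    (if ¬ 0 < pvLeftScan cs (cs.length / 2) ∧ ¬ pvRightScan cs (cs.length / 2 + 1) (cs.length - 1) < cs.length - 1 then t
     else
       String.ofList (PySem.Chars.strip (PySem.List.slice cs none (some (if 0 < pvLeftScan cs (cs.length / 2) ∧ (¬ pvRightScan cs (cs.length / 2 + 1) (cs.length - 1) < cs.length - 1 ∨ ((cs.length / 2 : Nat) : Int) - pvLeftScan cs (cs.length / 2) ≤ (pvRightScan cs (cs.length / 2 + 1) (cs.length - 1) : Int) - (cs.length / 2 : Nat)) then (pvLeftScan cs (cs.length / 2) : Int) else (pvRightScan cs (cs.length / 2 + 1) (cs.length - 1) : Int)))) ++ ['\n'] ++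
         PySem.Chars.strip (PySem.List.slice cs (some (if 0 < pvLeftScan cs (cs.length / 2) ∧ (¬ pvRightScan cs (cs.length / 2 + 1) (cs.length - 1) < cs.length - 1 ∨ ((cs.length / 2 : Nat) : Int) - pvLeftScan cs (cs.length / 2) ≤ (pvRightScan cs (cs.length / 2 + 1) (cs.length - 1) : Int) - (cs.length / 2 : Nat)) then (pvLeftScan cs (cs.length / 2) : Int) else (pvRightScan cs (cs.length / 2 + 1) (cs.length - 1) : Int))) none))) := by
  rw [pvScan_main cs]
  have hRge := pvRightScan_ge cs (cs.length / 2 + 1) (cs.length - 1)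
  by_cases hP : 0 < pvLeftScan cs (cs.length / 2) ∧ (¬ pvRightScan cs (cs.length / 2 + 1) (cs.length - 1) < cs.length - 1 ∨ ((cs.length / 2 : Nat) : Int) - pvLeftScan cs (cs.length / 2) ≤ (pvRightScan cs (cs.length / 2 + 1) (cs.length - 1) : Int) - (cs.length / 2 : Nat))
  · have hA : (0 : Int) < ((pvLeftScan cs (cs.length / 2) : Nat) : Int) := by exact_mod_cast hP.1
    have hB : ¬ (¬ 0 < pvLeftScan cs (cs.length / 2) ∧ ¬ pvRightScan cs (cs.length / 2 + 1) (cs.length - 1) < cs.length - 1) := fun hcon => hcon.1 hP.1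
    rw [if_pos hP, if_pos hA, if_neg hB, if_pos hP]
  · rw [if_neg hP]
    by_cases hr2 : pvRightScan cs (cs.length / 2 + 1) (cs.length - 1) < cs.length - 1
    · have hA : (0 : Int) < ((pvRightScan cs (cs.length / 2 + 1) (cs.length - 1) : Nat) : Int) := by exact_mod_cast (by omega : 0 < pvRightScan cs (cs.length / 2 + 1) (cs.length - 1))
      have hB : ¬ (¬ 0 < pvLeftScan cs (cs.length / 2) ∧ ¬ pvRightScan cs (cs.length / 2 + 1) (cs.length - 1) < cs.length - 1) := fun hcon => hcon.2 hr2
      rw [if_pos hr2, if_pos hA, if_neg hB, if_neg hP]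
    · have hA : ¬ (0 : Int) < -1 := by norm_num
      have hB : ¬ 0 < pvLeftScan cs (cs.length / 2) ∧ ¬ pvRightScan cs (cs.length / 2 + 1) (cs.length - 1) < cs.length - 1 :=
        ⟨fun hL0 => hP ⟨hL0, Or.inl hr2⟩, hr2⟩
      rw [if_neg hr2, if_neg hA, if_pos hB]

-- ===== VERDICT (by name: the statement is the Claim_ definition above) =====
theorem wrap_translated_line_spec : Claim_equal_wrap_translated_line := by
  intro text mc _
  unfold Spec_wrap_translated_line wrap_translated_line wrap_translated_line_alt
  refine if_congr Iff.rfl rfl (if_congr Iff.rfl rfl ?_)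
  exact pvCore text.toList text
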